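-- pv_equiv track=rewrite | github.com/Alexerson/adventofcode | src/y2024/day5.py | index_rules
-- ===== SOURCE A (Python) =====
-- def index_rules(
--     ordering_rules: list[tuple[int, int]],
-- ) -> dict[int, set[int]]:
--     rules: dict[int, set[int]] = {}
--
--     for before, after in ordering_rules:
--         if before not in rules:
--             rules[before] = set()
--
--         rules[before].add(after)
--     return rules
-- ===== SOURCE B (Python) =====
-- def index_rules(ordering_rules):
--     # Group-by-scan: list the distinct 'before' keys once (first-occurrence
--     # order), then build each key's set of 'after's with one filtered pass.
--     firsts = list(dict.fromkeys(b for b, _ in ordering_rules))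
--     return {b: {a for b2, a in ordering_rules if b2 == b} for b in firsts}
-- ===== Notes on version B (the rewrite author's own statement) =====
-- stated objective: alternative
-- what changed: B replaces A's incremental dict-of-sets scatter (create-if-missing, then add) by a group-by-scan: it first lists the distinct 'before' keys once with dict.fromkeys, then builds each key's set of 'after's by one filtered pass per key.
import Mathlib
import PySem

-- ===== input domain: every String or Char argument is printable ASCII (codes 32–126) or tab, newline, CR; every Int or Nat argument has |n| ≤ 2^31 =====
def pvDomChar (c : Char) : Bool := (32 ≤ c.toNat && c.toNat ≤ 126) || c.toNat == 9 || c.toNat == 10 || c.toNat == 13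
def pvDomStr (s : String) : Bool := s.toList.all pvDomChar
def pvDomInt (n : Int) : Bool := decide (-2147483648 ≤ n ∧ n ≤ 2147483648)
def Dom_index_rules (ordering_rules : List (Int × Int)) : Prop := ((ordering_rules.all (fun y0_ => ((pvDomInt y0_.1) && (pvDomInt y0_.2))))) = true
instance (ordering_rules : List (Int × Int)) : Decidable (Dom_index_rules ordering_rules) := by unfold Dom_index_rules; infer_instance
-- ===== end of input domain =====

-- B builds the same dict-of-sets by a group-by-scan (distinct keys first, then one
-- filtered pass per key) instead of A's incremental scatter; equal output, not faster.

-- ===== PORT A =====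
-- one loop body of A: 'if before not in rules: rules[before] = set()' then 'rules[before].add(after)'
def stepA (d : PySem.Dict Int (PySem.Set Int)) (p : Int × Int) : PySem.Dict Int (PySem.Set Int) :=
  let d := if d.contains p.1 then d else d.insert p.1 PySem.Set.empty
  d.modify p.1 PySem.Set.empty (fun s => PySem.Set.add s p.2)

def index_rules (ordering_rules : List (Int × Int)) : List (Int × List Int) :=
  (ordering_rules.foldl stepA PySem.Dict.empty).items

-- ===== PORT B =====
def index_rules_alt (ordering_rules : List (Int × Int)) : List (Int × List Int) :=
  let firsts := PySem.List.dedup (ordering_rules.map Prod.fst)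
  (firsts.foldl
    (fun d b =>
      d.insert b (PySem.Set.ofList ((ordering_rules.filter (fun p => p.1 == b)).map Prod.snd)))
    PySem.Dict.empty).items

-- ===== PRECONDITION & SPEC =====
def Spec_index_rules (ordering_rules : List (Int × Int)) (out : List (Int × List Int)) : Prop := out = index_rules_alt ordering_rules
instance (ordering_rules : List (Int × Int)) (out : List (Int × List Int)) : Decidable (Spec_index_rules ordering_rules out) := by unfold Spec_index_rules; infer_instance

-- ===== CLAIM (what is proved, stated in full; the proofs are below) =====
def Claim_equal_index_rules : Prop := ∀ (ordering_rules : List (Int × Int)), Dom_index_rules ordering_rules → Spec_index_rules ordering_rules (index_rules ordering_rules)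

-- ===== LEMMAS AND PROOFS =====

theorem keys_stepA (d : PySem.Dict Int (PySem.Set Int)) (p : Int × Int) :
    (stepA d p).keys = PySem.Set.add d.keys p.1 := by
  unfold stepA
  by_cases h : d.contains p.1 = true
  · simp only [h, if_true, PySem.Dict.keys_modify, PySem.Dict.keys_insert_of_contains _ _ h]
    rw [PySem.Set.add_of_mem]
    rw [PySem.Dict.contains_eq_decide_mem_keys] at h
    simpa using h
  · have h' : d.contains p.1 = false := by simpa using h
    simp only [h', Bool.false_eq_true, if_false]
    rw [PySem.Dict.keys_modify,
        PySem.Dict.keys_insert_of_contains _ _ (PySem.Dict.contains_insert_self d p.1 PySem.Set.empty),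
        PySem.Dict.keys_insert_of_not_contains _ _ h',
        PySem.Set.add_of_not_mem]
    rw [PySem.Dict.contains_eq_decide_mem_keys] at h'
    simpa using h'

theorem getD_stepA (d : PySem.Dict Int (PySem.Set Int)) (p : Int × Int) (c : Int) :
    (stepA d p).getD c PySem.Set.empty =
      if c = p.1 then PySem.Set.add (d.getD c PySem.Set.empty) p.2
      else d.getD c PySem.Set.empty := by
  unfold stepA
  by_cases h : d.contains p.1 = true
  · rw [if_pos h, PySem.Dict.getD_modify]
    split_ifs with hc
    · rw [hc]
    · rfl
  · have h' : d.contains p.1 = false := by simpa using h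
    rw [if_neg (by simp [h']), PySem.Dict.getD_modify]
    split_ifs with hc
    · rw [hc, PySem.Dict.getD_insert_self, PySem.Dict.getD_of_not_contains d PySem.Set.empty h']
    · rw [PySem.Dict.getD_insert]
      simp [hc]

theorem keys_foldA (rs : List (Int × Int)) :
    ∀ d : PySem.Dict Int (PySem.Set Int),
      (rs.foldl stepA d).keys = PySem.Set.update d.keys (rs.map Prod.fst) := by
  induction rs with
  | nil => intro d; simp [PySem.Set.update_nil]
  | cons p t ih =>
      intro d
      simp only [List.foldl_cons, List.map_cons, PySem.Set.update_cons, ih, keys_stepA]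

theorem getD_foldA (rs : List (Int × Int)) :
    ∀ (d : PySem.Dict Int (PySem.Set Int)) (c : Int),
      (rs.foldl stepA d).getD c PySem.Set.empty =
        PySem.Set.update (d.getD c PySem.Set.empty)
          ((rs.filter (fun p => p.1 == c)).map Prod.snd) := by
  induction rs with
  | nil => intro d c; simp [PySem.Set.update_nil]
  | cons p t ih =>
      intro d c
      simp only [List.foldl_cons, ih, getD_stepA]
      by_cases h : c = p.1
      · simp [h, PySem.Set.update_cons]
      · have hf : (p.1 == c) = false := by simp; exact fun e => h e.symm
        simp [hf, h]

theorem set_update_nil_left {α : Type} [BEq α] (s : PySem.Set α) (xs : List α)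
    (hs : s = []) : PySem.Set.update s xs = PySem.Set.ofList xs := by
  subst hs; rw [PySem.Set.ofList_eq_foldl]; rfl

theorem items_eq_map_keys (d : PySem.Dict Int (PySem.Set Int)) (h : d.keys.Nodup) :
    d.items = d.keys.map (fun k => (k, d.getD k PySem.Set.empty)) := by
  simp only [PySem.Dict.keys, List.map_map]
  have hmap : ∀ p ∈ d.items,
      ((fun k => (k, d.getD k PySem.Set.empty)) ∘ Prod.fst) p = id p := by
    rintro ⟨k, v⟩ hp
    have hg := PySem.Dict.getD_of_mem_items d (k := k) (v := v) hp h PySem.Set.empty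
    simpa using hg
  rw [List.map_congr_left hmap, List.map_id]

theorem empty_keys_empty : (PySem.Dict.empty : PySem.Dict Int (PySem.Set Int)).keys = [] :=
  PySem.Dict.keys_empty

-- ===== VERDICT (by name: the statement is the Claim_ definition above) =====
theorem index_rules_spec : Claim_equal_index_rules := by
  intro rs _
  unfold Spec_index_rules index_rules index_rules_alt
  -- A's side: items of the fold, keyed by the distinct firsts
  have hkeys : (rs.foldl stepA PySem.Dict.empty).keys = PySem.Set.ofList (rs.map Prod.fst) := by
    rw [keys_foldA, empty_keys_empty, set_update_nil_left _ _ rfl]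
  have hnodup : (rs.foldl stepA PySem.Dict.empty).keys.Nodup := by
    rw [hkeys]; exact PySem.Set.nodup_ofList _
  rw [items_eq_map_keys _ hnodup, hkeys]
  -- B's side: a fold of fresh distinct inserts appends its items
  have hfresh := PySem.Dict.items_foldl_insert_fresh
    (l := PySem.List.dedup (rs.map Prod.fst)) (k := fun b => b)
    (v := fun b => PySem.Set.ofList ((rs.filter (fun p => p.1 == b)).map Prod.snd))
    (d := (PySem.Dict.empty : PySem.Dict Int (PySem.Set Int)))
    (by intro a _; exact PySem.Dict.contains_empty a)
    (by simp [PySem.List.dedup_eq_ofList, PySem.Set.nodup_ofList])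
  simp only [PySem.List.dedup_eq_ofList] at hfresh ⊢
  rw [hfresh]
  have hie : (PySem.Dict.empty : PySem.Dict Int (PySem.Set Int)).items = [] := rfl
  simp only [hie, List.nil_append]
  apply List.map_congr_left
  intro k _
  rw [getD_foldA, PySem.Dict.getD_empty, set_update_nil_left PySem.Set.empty _ rfl]
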